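-- pv_equiv track=rewrite | github.com/NoahMollerstuen/Advent-of-Code | solutions/2023_day12/part1.py | check_record_consistency
-- ===== SOURCE A (Python) =====
-- def check_record_consistency(springs, groups):
--     group_len = 0
--     group_index = -1
--     in_group = False
--     for c in springs + ["."]:
--         if c == '?':
--             return True
--         if in_group:
--             if c == "#":
--                 group_len += 1
--             else:
--                 if groups[group_index] != group_len:
--                     return False
--                 in_group = False
--         else:
--             if c == "#":
--                 group_index += 1
--                 if group_index >= len(groups):
--                     return False
--                 in_group = True
--                 group_len = 1
--
--     return group_index == len(groups) - 1
-- ===== SOURCE B (Python) =====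
-- def check_record_consistency(springs, groups):
--     # Locate the first unknown cell; only springs[:p] is determined.
--     try:
--         p = springs.index('?')
--     except ValueError:
--         p = len(springs)
--     # Collect maximal runs of consecutive '#' in the determined prefix.
--     runs = []
--     cur = 0
--     for c in springs[:p]:
--         if c == '#':
--             cur += 1
--         elif cur:
--             runs.append(cur)
--             cur = 0
--     if p == len(springs):
--         # Fully determined record: the runs must match the groups exactly.
--         if cur:
--             runs.append(cur)
--         return runs == groups
--     # 'cur' is an unvalidated partial run touching the '?'.
--     started = len(runs) + (1 if cur else 0)
--     return started <= len(groups) and runs == groups[:len(runs)]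
-- ===== Notes on version B (the rewrite author's own statement) =====
-- stated objective: alternative
-- what changed: A is a one-pass state machine (in_group/group_len/group_index with early returns); B instead finds the first '?', collects the maximal '#'-runs of the determined prefix into a list, and decides by list comparison: exact equality with groups when there is no '?', otherwise a started-run bound plus prefix equality with groups.
import Mathlib
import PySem

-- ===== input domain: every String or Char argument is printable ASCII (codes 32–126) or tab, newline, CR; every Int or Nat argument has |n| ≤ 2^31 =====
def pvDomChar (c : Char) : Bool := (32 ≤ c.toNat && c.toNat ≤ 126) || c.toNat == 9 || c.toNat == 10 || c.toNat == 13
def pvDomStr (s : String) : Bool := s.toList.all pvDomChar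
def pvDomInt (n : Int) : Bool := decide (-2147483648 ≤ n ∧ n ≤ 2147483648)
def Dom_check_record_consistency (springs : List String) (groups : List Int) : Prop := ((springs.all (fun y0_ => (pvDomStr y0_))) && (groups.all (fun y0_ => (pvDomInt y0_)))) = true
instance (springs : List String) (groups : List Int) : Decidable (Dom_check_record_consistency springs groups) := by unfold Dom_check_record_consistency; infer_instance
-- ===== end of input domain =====

-- B re-decomposes A's streaming state machine into: find the first '?', collect the '#'-runs
-- of the determined prefix, and compare run lists against `groups` (objective: alternative).

-- ===== PORT A =====
-- the for-loop of A: state (group_len, group_index, in_group); early returns become results.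
-- groups[group_index] is read with pyGet?; `.getD 0` is only reached when the index is in
-- range (in_group guarantees 0 ≤ group_index < len(groups)), so it is exact.
def crcLoop (groups : List Int) : List String → Int → Int → Bool → Bool
  | [], _, gi, _ => decide (gi = (groups.length : Int) - 1)
  | c :: rest, gl, gi, ig =>
    if c = "?" then true
    else if ig then
      if c = "#" then crcLoop groups rest (gl + 1) gi ig
      else if (PySem.List.pyGet? groups gi).getD 0 ≠ gl then false
      else crcLoop groups rest gl gi false
    else
      if c = "#" then
        if gi + 1 ≥ (groups.length : Int) then false
        else crcLoop groups rest 1 (gi + 1) true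
      else crcLoop groups rest gl gi false

def check_record_consistency (springs : List String) (groups : List Int) : Bool :=
  crcLoop groups (springs ++ ["."]) 0 (-1) false

-- ===== PORT B =====
-- B's run-collecting loop over the determined prefix: accumulates (runs, cur).
def crcCollect : List String → List Int → Int → List Int × Int
  | [], runs, cur => (runs, cur)
  | c :: rest, runs, cur =>
    if c = "#" then crcCollect rest runs (cur + 1)
    else if cur ≠ 0 then crcCollect rest (runs ++ [cur]) 0
    else crcCollect rest runs cur

def check_record_consistency_alt (springs : List String) (groups : List Int) : Bool :=
  let p : Nat := (PySem.List.index? springs "?").getD springs.length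
  let pr := crcCollect (PySem.List.slice springs none (some (p : Int))) [] 0
  if p = springs.length then
    decide ((if pr.2 ≠ 0 then pr.1 ++ [pr.2] else pr.1) = groups)
  else
    decide (pr.1.length + (if pr.2 ≠ 0 then 1 else 0) ≤ groups.length) &&
      decide (pr.1 = groups.take pr.1.length)

-- ===== PRECONDITION & SPEC =====
def Spec_check_record_consistency (springs : List String) (groups : List Int) (out : Bool) : Prop := out = check_record_consistency_alt springs groups
instance (springs : List String) (groups : List Int) (out : Bool) : Decidable (Spec_check_record_consistency springs groups out) := by unfold Spec_check_record_consistency; infer_instance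

-- ===== CLAIM (what is proved, stated in full; the proofs are below) =====
def Claim_equal_check_record_consistency : Prop := ∀ (springs : List String) (groups : List Int), Dom_check_record_consistency springs groups → Spec_check_record_consistency springs groups (check_record_consistency springs groups)

-- ===== LEMMAS AND PROOFS =====

-- Bcont: B's computation continued from an arbitrary accumulator state (runs, cur).
def Bcont (groups : List Int) (xs : List String) (runs : List Int) (cur : Int) : Bool :=
  let p : Nat := (PySem.List.index? xs "?").getD xs.length
  let pr := crcCollect (xs.take p) runs cur
  if p = xs.length then
    decide ((if pr.2 ≠ 0 then pr.1 ++ [pr.2] else pr.1) = groups)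
  else
    decide (pr.1.length + (if pr.2 ≠ 0 then 1 else 0) ≤ groups.length) &&
      decide (pr.1 = groups.take pr.1.length)

theorem alt_eq_Bcont (springs : List String) (groups : List Int) :
    check_record_consistency_alt springs groups = Bcont groups springs [] 0 := by
  simp only [check_record_consistency_alt, Bcont, PySem.List.slice_to_natCast]

theorem Bcont_nil (groups runs : List Int) (cur : Int) :
    Bcont groups [] runs cur =
      decide ((if cur ≠ 0 then runs ++ [cur] else runs) = groups) := by
  simp [Bcont, crcCollect]

theorem crcCollect_step (c : String) (rest : List String) (runs : List Int) (cur : Int)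
    (hc : c ≠ "?") :
    crcCollect (c :: rest) runs cur =
      crcCollect rest (if c = "#" then runs else if cur ≠ 0 then runs ++ [cur] else runs)
        (if c = "#" then cur + 1 else 0) := by
  by_cases h : c = "#" <;> by_cases h2 : cur = 0 <;> simp [crcCollect, h, h2]

theorem Bcont_q (groups : List Int) (rest : List String) (runs : List Int) (cur : Int) :
    Bcont groups ("?" :: rest) runs cur =
      (decide (runs.length + (if cur ≠ 0 then 1 else 0) ≤ groups.length) &&
        decide (runs = groups.take runs.length)) := by
  rw [Bcont, PySem.List.index?_cons_self]
  simp only [Option.getD_some, List.take_zero]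
  by_cases hcur : cur = 0 <;>
    simp [crcCollect, hcur] <;> (try rfl) <;> congr 1 <;> simp [decide_eq_decide]

theorem Bcont_cons (groups : List Int) (c : String) (rest : List String)
    (runs : List Int) (cur : Int) (hc : c ≠ "?") :
    Bcont groups (c :: rest) runs cur =
      Bcont groups rest (if c = "#" then runs else if cur ≠ 0 then runs ++ [cur] else runs)
        (if c = "#" then cur + 1 else 0) := by
  have hidx : PySem.List.index? (c :: rest) "?" = (PySem.List.index? rest "?").map (· + 1) :=
    PySem.List.index?_cons_of_ne rest hc
  rcases h : PySem.List.index? rest "?" with _ | k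
  · -- no '?' anywhere: both sides take the whole list
    rw [Bcont, Bcont, hidx, h]
    simp only [Option.map_none, Option.getD_none, List.length_cons, if_pos rfl,
      List.take_succ_cons, List.take_length, crcCollect_step c rest runs cur hc]
  · -- first '?' at position k of rest
    have hk : k < rest.length := by
      rcases PySem.List.getElem_of_index?_eq_some h with ⟨hk, _⟩
      exact hk
    have h1 : ¬ (k + 1 = ("?" :: rest).length) := by simp; omega
    have h2 : ¬ (k = rest.length) := by omega
    rw [Bcont, Bcont, hidx, h]
    simp only [Option.map_some, Option.getD_some, List.length_cons, if_neg (by omega : ¬ (k + 1 = rest.length + 1)), if_neg h2,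
      List.take_succ_cons, crcCollect_step c (List.take k rest) runs cur hc]
    rfl

theorem mismatch_snoc (groups runs : List Int) (x : Int)
    (h : runs ≠ groups.take runs.length) :
    runs ++ [x] ≠ groups.take (runs.length + 1) := by
  intro heq
  apply h
  have := congrArg (List.take runs.length) heq
  simpa [List.take_left, List.take_take] using this

theorem poison (groups : List Int) :
    ∀ (xs : List String) (runs : List Int) (cur : Int), 0 ≤ cur →
      (runs ≠ groups.take runs.length ∨
        (groups.length : Int) < runs.length + (if cur ≠ 0 then 1 else 0)) →
      Bcont groups xs runs cur = false := by
  intro xs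
  induction xs with
  | nil =>
    intro runs cur h0 hp
    rw [Bcont_nil]
    simp only [decide_eq_false_iff_not]
    intro heq
    by_cases hc0 : cur = 0
    · rw [if_neg (by simp [hc0])] at heq
      rcases hp with hp | hp
      · exact hp (by rw [heq, List.take_length])
      · have hl : runs.length = groups.length := by rw [heq]
        simp only [hc0, ne_eq, not_true_eq_false, if_false] at hp
        omega
    · rw [if_pos hc0] at heq
      rcases hp with hp | hp
      · apply hp
        have := congrArg (List.take runs.length) heq
        simpa [List.take_left, List.take_take] using this
      · have hl := congrArg List.length heq
        simp only [List.length_append, List.length_singleton] at hl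
        simp only [hc0, ne_eq, not_false_eq_true, if_pos] at hp
        omega
  | cons c rest ih =>
    intro runs cur h0 hp
    by_cases hq : c = "?"
    · subst hq
      rw [Bcont_q]
      rcases hp with hp | hp
      · simp [hp]
      · have hnb : ¬ ((runs.length + if cur = 0 then 0 else 1) ≤ groups.length) := by
          rcases eq_or_ne cur 0 with h | h <;> simp [h] at hp ⊢ <;> omega
        simp [hnb]
    · rw [Bcont_cons groups c rest runs cur hq]
      by_cases hsh : c = "#"
      · simp only [if_pos hsh]
        apply ih _ (cur + 1) (by omega)
        rcases hp with hp | hp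
        · exact Or.inl hp
        · right
          have h1 : cur + 1 ≠ 0 := by omega
          simp only [h1, ne_eq, not_false_eq_true, if_pos]
          by_cases hc0 : cur = 0 <;> simp [hc0] at hp <;> omega
      · simp only [if_neg hsh]
        by_cases hc0 : cur = 0
        · simp only [hc0, ne_eq, not_true_eq_false, if_false]
          apply ih runs 0 le_rfl
          simp only [hc0, ne_eq, not_true_eq_false, if_false] at hp
          simpa using hp
        · simp only [hc0, ne_eq, not_false_eq_true, if_pos]
          apply ih (runs ++ [cur]) 0 le_rfl
          simp only [hc0, ne_eq, not_false_eq_true, if_pos] at hp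
          rcases hp with hp | hp
          · left
            simpa [List.length_append] using mismatch_snoc groups runs cur hp
          · right
            simp at hp ⊢; omega

theorem take_snoc (groups runs : List Int) (cur : Int) (hlt : runs.length < groups.length)
    (hR : runs = groups.take runs.length) (hg : groups[runs.length]'hlt = cur) :
    runs ++ [cur] = groups.take (runs.length + 1) := by
  rw [List.take_succ, ← hR, List.getElem?_eq_getElem hlt, hg]
  rfl

theorem main_loop (groups : List Int) :
    ∀ (xs : List String) (runs : List Int) (cur gl : Int), 0 ≤ cur →
      (cur ≠ 0 → gl = cur) →
      runs = groups.take runs.length →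
      runs.length + (if cur ≠ 0 then 1 else 0) ≤ groups.length →
      crcLoop groups (xs ++ ["."]) gl
          ((runs.length : Int) - 1 + (if cur ≠ 0 then 1 else 0)) (decide (cur ≠ 0)) =
        Bcont groups xs runs cur := by
  intro xs
  induction xs with
  | nil =>
    intro runs cur gl h0 hgl hR hlen
    simp only [List.nil_append]
    rw [Bcont_nil]
    by_cases hc0 : cur = 0
    · simp only [hc0, ne_eq, not_true_eq_false, decide_false, if_false]
      simp only [crcLoop, if_neg (by decide : ¬ ("." : String) = "?"),
        if_neg (by decide : ¬ ("." : String) = "#"), Bool.false_eq_true, if_false]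
      rw [decide_eq_decide]
      simp only [hc0, ne_eq, not_true_eq_false, if_false] at hlen ⊢
      constructor
      · intro h
        have hl : runs.length = groups.length := by omega
        calc runs = groups.take runs.length := hR
          _ = groups := by rw [hl, List.take_length]
      · intro h
        have := congrArg List.length h
        simp at this; omega
    · have hlt : runs.length < groups.length := by
        simp only [hc0, ne_eq, not_false_eq_true, if_pos] at hlen; omega
      have hgi : (runs.length : Int) - 1 + (if cur ≠ 0 then 1 else 0) = (runs.length : Int) := by
        simp [hc0]
      rw [hgi]
      have hpg : PySem.List.pyGet? groups ((runs.length : Nat) : Int) =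
          some (groups[runs.length]'hlt) := by
        simp [PySem.List.pyGet?_natCast, List.getElem?_eq_getElem hlt]
      simp only [hc0, ne_eq, not_false_eq_true, decide_true, if_pos]
      simp only [crcLoop, if_neg (by decide : ¬ ("." : String) = "?"),
        if_neg (by decide : ¬ ("." : String) = "#"), if_pos rfl, hpg, Option.getD_some,
        hgl hc0]
      rw [if_pos trivial]
      split_ifs with hcond
      · symm
        simp only [decide_eq_false_iff_not]
        intro heq
        apply hcond
        have h2 := congrArg (fun l => l[runs.length]?) heq
        simp only [List.getElem?_concat_length, List.getElem?_eq_getElem hlt] at h2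
        exact (Option.some.inj h2).symm
      · rw [not_ne_iff] at hcond
        rw [decide_eq_decide]
        constructor
        · intro h
          have hl : runs.length + 1 = groups.length := by omega
          calc runs ++ [cur] = groups.take (runs.length + 1) :=
                take_snoc groups runs cur hlt hR hcond
            _ = groups := by rw [hl, List.take_length]
        · intro h
          have := congrArg List.length h
          simp at this; omega
  | cons c rest ih =>
    intro runs cur gl h0 hgl hR hlen
    simp only [List.cons_append]
    by_cases hq : c = "?"
    · subst hq
      rw [Bcont_q]
      simp only [crcLoop]
      rw [if_pos trivial, decide_eq_true hlen, decide_eq_true hR, Bool.and_self]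
    · rw [Bcont_cons groups c rest runs cur hq]
      by_cases hsh : c = "#"
      · simp only [if_pos hsh]
        by_cases hc0 : cur = 0
        · simp only [hc0, ne_eq, not_true_eq_false, decide_false, if_false]
          simp only [crcLoop, if_neg hq, Bool.false_eq_true, if_false, if_pos hsh]
          simp only [hc0, ne_eq, not_true_eq_false, if_false] at hlen
          by_cases hover : runs.length = groups.length
          · rw [if_pos (by push_cast; omega)]
            symm
            apply poison groups rest runs 1 (by omega)
            right; simp; omega
          · rw [if_neg (by push_cast; omega)]
            have h1 : ((runs.length : Int) - 1 + 0) + 1 =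
                (runs.length : Int) - 1 + (if (1 : Int) ≠ 0 then 1 else 0) := by simp
            rw [h1]
            have := ih runs 1 1 (by omega) (fun _ => rfl) hR (by simp; omega)
            simpa using this
        · have hcp : cur + 1 ≠ 0 := by omega
          simp only [hc0, ne_eq, not_false_eq_true, decide_true, if_pos]
          simp only [crcLoop, if_neg hq, if_pos hsh]
          rw [if_pos trivial]
          have e1 : ((runs.length : Int) - 1 + 1) =
              (runs.length : Int) - 1 + (if cur + 1 ≠ 0 then 1 else 0) := by simp [hcp]
          have e2 : (true : Bool) = decide (cur + 1 ≠ 0) := by simp [hcp]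
          rw [e1, e2]
          exact ih runs (cur + 1) (gl + 1) (by omega) (fun _ => by rw [hgl hc0]) hR
            (by simpa [hc0, hcp] using hlen)
      · simp only [if_neg hsh]
        by_cases hc0 : cur = 0
        · simp only [hc0, ne_eq, not_true_eq_false, decide_false, if_false]
          simp only [crcLoop, if_neg hq, Bool.false_eq_true, if_false, if_neg hsh]
          exact ih runs 0 gl le_rfl (by simp) hR (by simpa [hc0] using hlen)
        · have hlt : runs.length < groups.length := by
            simp only [hc0, ne_eq, not_false_eq_true, if_pos] at hlen; omega
          have hgi : (runs.length : Int) - 1 + (if cur ≠ 0 then 1 else 0) =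
              (runs.length : Int) := by simp [hc0]
          rw [hgi]
          have hpg : PySem.List.pyGet? groups ((runs.length : Nat) : Int) =
              some (groups[runs.length]'hlt) := by
            simp [PySem.List.pyGet?_natCast, List.getElem?_eq_getElem hlt]
          simp only [hc0, ne_eq, not_false_eq_true, decide_true, if_pos]
          simp only [crcLoop, if_neg hq, if_neg hsh, hpg, Option.getD_some, hgl hc0]
          rw [if_pos trivial]
          split_ifs with hcond
          · symm
            apply poison groups rest (runs ++ [cur]) 0 le_rfl
            left
            intro heq
            apply hcond
            have h2 := congrArg (fun l => l[runs.length]?) heq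
            simp only [List.getElem?_concat_length] at h2
            rw [List.getElem?_take, if_pos (by simp : runs.length < (runs ++ [cur]).length),
              List.getElem?_eq_getElem hlt] at h2
            exact (Option.some.inj h2).symm
          · rw [not_ne_iff] at hcond
            have hR' : runs ++ [cur] = groups.take ((runs ++ [cur]).length) := by
              simpa using take_snoc groups runs cur hlt hR hcond
            have e1 : (runs.length : Int) =
                (((runs ++ [cur]).length : Nat) : Int) - 1 + (if (0 : Int) ≠ 0 then 1 else 0) := by
              simp
            have e2 : (false : Bool) = decide ((0 : Int) ≠ 0) := by simp
            rw [e1, e2]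
            exact ih (runs ++ [cur]) 0 cur le_rfl (by simp) hR' (by simp; omega)

-- ===== VERDICT (by name: the statement is the Claim_ definition above) =====
theorem check_record_consistency_spec : Claim_equal_check_record_consistency := by
  intro springs groups _
  unfold Spec_check_record_consistency
  rw [alt_eq_Bcont]
  have h := main_loop groups springs [] 0 0 (le_refl 0) (by simp) (by simp) (by simp)
  simpa [check_record_consistency] using h
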